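-- pv_equiv track=rewrite | github.com/EricBouwers/adventofcode | 2025/10/solve.py | full_buttons
-- ===== SOURCE A (Python) =====
-- def full_buttons(buttons, joltages):
--     complete_buttons = []
--     for i in range(0, len(joltages)):
--         joltage_button = [0] * len(buttons)
--         for j, b in enumerate(buttons):
--             joltage_button[j] = 1 if i in b else 0
--         complete_buttons.append(joltage_button)
--     return complete_buttons
-- ===== SOURCE B (Python) =====
-- def full_buttons(buttons, joltages):
--     n = len(joltages)
--     result = [[0] * len(buttons) for _ in range(n)]
--     for j, b in enumerate(buttons):
--         for e in b:
--             if 0 <= e < n: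
--                 result[e][j] = 1
--     return result
-- ===== Notes on version B (the rewrite author's own statement) =====
-- stated objective: faster
-- what changed: Instead of testing 'i in b' for every (joltage, button) cell, B allocates the all-zero matrix once and scatters 1s by iterating over each button's contents, writing result[e][j] = 1 for in-range elements — inverted loop nesting driven by the sparse button lists.
import Mathlib
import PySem

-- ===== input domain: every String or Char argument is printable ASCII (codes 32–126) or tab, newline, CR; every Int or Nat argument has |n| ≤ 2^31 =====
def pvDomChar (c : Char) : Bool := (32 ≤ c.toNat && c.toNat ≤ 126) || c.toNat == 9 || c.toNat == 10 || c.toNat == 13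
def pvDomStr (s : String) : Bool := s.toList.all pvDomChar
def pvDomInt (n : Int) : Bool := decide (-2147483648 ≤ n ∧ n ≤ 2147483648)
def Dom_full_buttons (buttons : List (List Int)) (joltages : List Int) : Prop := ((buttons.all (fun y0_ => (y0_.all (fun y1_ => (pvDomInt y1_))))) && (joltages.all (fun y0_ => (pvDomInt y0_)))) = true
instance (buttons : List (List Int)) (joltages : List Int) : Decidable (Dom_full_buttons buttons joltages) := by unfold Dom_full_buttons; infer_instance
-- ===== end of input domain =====

-- B inverts the loop nesting: instead of testing 'i in b' for every (joltage, button) cell,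
-- it allocates the zero matrix once and scatters 1s from each button's contents (objective: faster).


-- ===== PORT A =====
def full_buttons (buttons : List (List Int)) (joltages : List Int) : List (List Int) :=
  (PySem.List.pyRange 0 (joltages.length : Int) 1).foldl
    (fun complete_buttons i =>
      let jb0 := List.replicate buttons.length (0 : Int)
      let jb := (PySem.List.enumerate buttons 0).foldl
        (fun jb p => jb.set p.1.toNat (if i ∈ p.2 then (1 : Int) else 0)) jb0
      complete_buttons ++ [jb]) []

-- ===== PORT B =====
def full_buttons_alt (buttons : List (List Int)) (joltages : List Int) : List (List Int) :=
  let n := joltages.length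
  let init := List.replicate n (List.replicate buttons.length (0 : Int))
  (PySem.List.enumerate buttons 0).foldl
    (fun res p =>
      p.2.foldl
        (fun res e =>
          if 0 ≤ e ∧ e < (n : Int) then
            res.modify e.toNat (fun row => row.set p.1.toNat 1)
          else res)
        res)
    init

-- ===== PRECONDITION & SPEC =====
def Spec_full_buttons (buttons : List (List Int)) (joltages : List Int) (out : List (List Int)) : Prop := out = full_buttons_alt buttons joltages
instance (buttons : List (List Int)) (joltages : List Int) (out : List (List Int)) : Decidable (Spec_full_buttons buttons joltages out) := by unfold Spec_full_buttons; infer_instance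

-- ===== CLAIM (what is proved, stated in full; the proofs are below) =====
def Claim_equal_full_buttons : Prop := ∀ (buttons : List (List Int)) (joltages : List Int), Dom_full_buttons buttons joltages → Spec_full_buttons buttons joltages (full_buttons buttons joltages)

-- ===== LEMMAS AND PROOFS =====

-- the common target: row i is buttons.map (membership test for i)
def pvRow (buttons : List (List Int)) (i : Int) : List Int :=
  buttons.map (fun b => if i ∈ b then 1 else 0)

def pvSpecMat (buttons : List (List Int)) (n : Nat) : List (List Int) :=
  (List.range n).map (fun (i : Nat) => pvRow buttons (i : Int))

-- generic helpers ------------------------------------------------------------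

theorem pv_take_set (l : List Int) (s : Nat) (v : Int) (h : s < l.length) :
    (l.set s v).take (s+1) = l.take s ++ [v] := by
  rw [List.set_eq_take_cons_drop v h, List.take_append]
  simp [Nat.min_eq_left (Nat.le_of_lt h)]

theorem pv_take_succ (l : List Int) (s : Nat) (h : s < l.length) :
    l.take (s+1) = l.take s ++ [l[s]] := by
  rw [List.take_add_one, List.getElem?_eq_getElem h]; rfl

-- A side ---------------------------------------------------------------------

-- the inner enumerate/set loop writes buttons.map f past position s
theorem pvA_inner (i : Int) :
    ∀ (bs : List (List Int)) (s : Nat) (jb : List Int), jb.length = s + bs.length →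
      (PySem.List.enumerate bs (s : Int)).foldl
        (fun jb p => jb.set p.1.toNat (if i ∈ p.2 then (1 : Int) else 0)) jb
      = jb.take s ++ pvRow bs i := by
  intro bs
  induction bs with
  | nil =>
    intro s jb h
    simp only [List.length_nil, Nat.add_zero] at h
    simp [PySem.List.enumerate_nil, pvRow, List.take_of_length_le (Nat.le_of_eq h)]
  | cons b rest ih =>
    intro s jb h
    simp only [List.length_cons] at h
    rw [PySem.List.enumerate_cons]
    have hcast : (s : Int) + 1 = ((s + 1 : Nat) : Int) := by push_cast; ring
    simp only [List.foldl_cons, hcast]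
    have hs : s < jb.length := by omega
    rw [ih (s+1) _ (by simp [List.length_set]; omega)]
    rw [show ((s : Int)).toNat = s from Int.toNat_natCast s]
    rw [pv_take_set jb s _ hs]
    simp [pvRow]

theorem pvA_inner0 (i : Int) (bs : List (List Int)) :
    (PySem.List.enumerate bs 0).foldl
      (fun jb p => jb.set p.1.toNat (if i ∈ p.2 then (1 : Int) else 0))
      (List.replicate bs.length 0)
    = pvRow bs i := by
  have h := pvA_inner i bs 0 (List.replicate bs.length 0) (by simp)
  simpa using h

-- the outer loop appends one row per range element
theorem pvA_outer (buttons : List (List Int)) :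
    ∀ (l : List Int) (acc : List (List Int)),
      l.foldl
        (fun complete_buttons i =>
          let jb0 := List.replicate buttons.length (0 : Int)
          let jb := (PySem.List.enumerate buttons 0).foldl
            (fun jb p => jb.set p.1.toNat (if i ∈ p.2 then (1 : Int) else 0)) jb0
          complete_buttons ++ [jb]) acc
      = acc ++ l.map (fun i => pvRow buttons i) := by
  intro l
  induction l with
  | nil => simp
  | cons x xs ih =>
    intro acc
    simp only [List.foldl_cons, List.map_cons, ih]
    rw [pvA_inner0 x buttons]
    simp

theorem pvA_eq (buttons : List (List Int)) (joltages : List Int) :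
    full_buttons buttons joltages = pvSpecMat buttons joltages.length := by
  unfold full_buttons
  rw [pvA_outer]
  have : PySem.List.pyRange 0 (joltages.length : Int) 1
      = (List.range joltages.length).map (fun (k : Nat) => (k : Int)) :=
    PySem.List.pyRange_zero_nat joltages.length
  rw [this]
  simp [pvSpecMat, List.map_map, Function.comp]

-- B side ---------------------------------------------------------------------

-- shape: the scatter folds preserve length
theorem pvB_len_inner (n : Nat) (j : Nat) :
    ∀ (b : List Int) (res : List (List Int)),
      (b.foldl
        (fun res e =>
          if 0 ≤ e ∧ e < (n : Int) then
            res.modify e.toNat (fun row => row.set j 1)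
          else res) res).length = res.length := by
  intro b
  induction b with
  | nil => intro res; rfl
  | cons e rest ih =>
    intro res
    simp only [List.foldl_cons]
    rw [ih]
    split <;> simp

-- scatter of one button, seen at row i (i < res.length = n)
theorem pvB_row_inner (n : Nat) (j : Nat) (i : Nat) (hin : i < n) :
    ∀ (b : List Int) (res : List (List Int)), res.length = n →
      (b.foldl
        (fun res e =>
          if 0 ≤ e ∧ e < (n : Int) then
            res.modify e.toNat (fun row => row.set j 1)
          else res) res).getD i []
      = if (i : Int) ∈ b then (res.getD i []).set j 1 else res.getD i [] := by
  intro b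
  induction b with
  | nil => intro res h; simp
  | cons e rest ih =>
    intro res h
    simp only [List.foldl_cons]
    by_cases hg : 0 ≤ e ∧ e < (n : Int)
    · rw [if_pos hg]
      have hlen : (res.modify e.toNat (fun row => row.set j 1)).length = n := by
        simp [h]
      rw [ih _ hlen]
      by_cases he : e = (i : Int)
      · have hti : e.toNat = i := by omega
        have hget : (res.modify e.toNat (fun row => row.set j 1)).getD i []
            = (res.getD i []).set j 1 := by
          subst hti
          have hlt : e.toNat < res.length := by omega
          rw [List.getD_eq_getElem _ _ (by simpa using hlt),
              List.getD_eq_getElem _ _ hlt]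
          simp
        rw [hget]
        have : (i : Int) ∈ e :: rest := by rw [← he]; exact List.mem_cons_self
        rw [if_pos this]
        split <;> simp [List.set_set]
      · have hti : e.toNat ≠ i := by omega
        have hget : (res.modify e.toNat (fun row => row.set j 1)).getD i []
            = res.getD i [] := by
          by_cases hi : i < res.length
          · rw [List.getD_eq_getElem _ _ (by simpa using hi),
                List.getD_eq_getElem _ _ hi]
            simp [hti]
          · rw [List.getD_eq_default _ _ (by simpa using (Nat.le_of_not_lt hi)),
                List.getD_eq_default _ _ (Nat.le_of_not_lt hi)]
        rw [hget]
        have hmem : ((i : Int) ∈ e :: rest) ↔ ((i : Int) ∈ rest) := by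
          constructor
          · intro hm; rcases List.mem_cons.mp hm with h1 | h1
            · exact absurd h1.symm he
            · exact h1
          · exact fun hm => List.mem_cons_of_mem _ hm
        rw [if_congr hmem rfl rfl]
    · rw [if_neg hg]
      rw [ih _ h]
      have he : e ≠ (i : Int) := by
        intro hc; apply hg; constructor <;> omega
      have hmem : ((i : Int) ∈ e :: rest) ↔ ((i : Int) ∈ rest) := by
        constructor
        · intro hm; rcases List.mem_cons.mp hm with h1 | h1
          · exact absurd h1.symm he
          · exact h1
        · exact fun hm => List.mem_cons_of_mem _ hm
      rw [if_congr hmem rfl rfl]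

-- accumulated effect of the scatter on one row, expressed structurally
def pvMark (row : List Int) (i : Int) : List (List Int) → Nat → List Int
  | [], _ => row
  | b :: bs, s => pvMark (if i ∈ b then row.set s 1 else row) i bs (s + 1)

theorem pvB_len_outer (n : Nat) :
    ∀ (bs : List (List Int)) (s : Nat) (res : List (List Int)),
      ((PySem.List.enumerate bs (s : Int)).foldl
        (fun res p =>
          p.2.foldl
            (fun res e =>
              if 0 ≤ e ∧ e < (n : Int) then
                res.modify e.toNat (fun row => row.set p.1.toNat 1)
              else res) res) res).length = res.length := by
  intro bs
  induction bs with
  | nil => intro s res; simp [PySem.List.enumerate_nil]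
  | cons b rest ih =>
    intro s res
    rw [PySem.List.enumerate_cons]
    have hcast : (s : Int) + 1 = ((s + 1 : Nat) : Int) := by push_cast; ring
    simp only [List.foldl_cons, hcast]
    rw [ih (s+1)]
    exact pvB_len_inner n _ b res

theorem pvB_row_outer (n : Nat) (i : Nat) (hin : i < n) :
    ∀ (bs : List (List Int)) (s : Nat) (res : List (List Int)), res.length = n →
      ((PySem.List.enumerate bs (s : Int)).foldl
        (fun res p =>
          p.2.foldl
            (fun res e =>
              if 0 ≤ e ∧ e < (n : Int) then
                res.modify e.toNat (fun row => row.set p.1.toNat 1)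
              else res) res) res).getD i []
      = pvMark (res.getD i []) (i : Int) bs s := by
  intro bs
  induction bs with
  | nil => intro s res h; simp [PySem.List.enumerate_nil, pvMark]
  | cons b rest ih =>
    intro s res h
    rw [PySem.List.enumerate_cons]
    have hcast : (s : Int) + 1 = ((s + 1 : Nat) : Int) := by push_cast; ring
    simp only [List.foldl_cons, hcast]
    have hlen : (b.foldl
        (fun res e =>
          if 0 ≤ e ∧ e < (n : Int) then
            res.modify e.toNat (fun row => row.set ((s : Int)).toNat 1)
          else res) res).length = n := by
      rw [pvB_len_inner]; exact h
    rw [ih (s+1) _ hlen]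
    rw [show ((s : Int)).toNat = s from Int.toNat_natCast s]
    rw [pvB_row_inner n s i hin b res h]
    simp [pvMark]

theorem pvB_len_outer0 (n : Nat) (bs : List (List Int)) (res : List (List Int)) :
    ((PySem.List.enumerate bs 0).foldl
      (fun res p =>
        p.2.foldl
          (fun res e =>
            if 0 ≤ e ∧ e < (n : Int) then
              res.modify e.toNat (fun row => row.set p.1.toNat 1)
            else res) res) res).length = res.length := by
  have h := pvB_len_outer n bs 0 res
  simpa using h

theorem pvB_row_outer0 (n : Nat) (i : Nat) (hin : i < n) (bs : List (List Int))
    (res : List (List Int)) (h : res.length = n) :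
    ((PySem.List.enumerate bs 0).foldl
      (fun res p =>
        p.2.foldl
          (fun res e =>
            if 0 ≤ e ∧ e < (n : Int) then
              res.modify e.toNat (fun row => row.set p.1.toNat 1)
            else res) res) res).getD i []
    = pvMark (res.getD i []) (i : Int) bs 0 := by
  have hh := pvB_row_outer n i hin bs 0 res h
  simpa using hh

-- pvMark over a zero suffix builds exactly the membership row
theorem pvMark_eq :
    ∀ (bs : List (List Int)) (s : Nat) (row : List Int) (i : Int),
      row.length = s + bs.length → row.drop s = List.replicate bs.length 0 →
      pvMark row i bs s = row.take s ++ pvRow bs i := by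
  intro bs
  induction bs with
  | nil =>
    intro s row i h _
    simp only [List.length_nil, Nat.add_zero] at h
    simp [pvMark, pvRow, List.take_of_length_le (Nat.le_of_eq h)]
  | cons b rest ih =>
    intro s row i h hz
    simp only [List.length_cons] at h
    have hs : s < row.length := by omega
    have hsome : row[s]? = some 0 := by
      have hdg : (row.drop s)[0]? = row[s+0]? := List.getElem?_drop
      rw [hz] at hdg
      simp only [Nat.add_zero] at hdg
      rw [← hdg]
      simp
    have hhead : row[s] = 0 := by
      have h4 := List.getElem?_eq_getElem hs
      rw [h4] at hsome
      exact Option.some.inj hsome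
    simp only [pvMark]
    by_cases hm : i ∈ b
    · rw [if_pos hm]
      rw [ih (s+1) _ i (by simp [List.length_set]; omega)
          (by rw [List.drop_set_of_lt]
              · have hd : row.drop (s+1) = (row.drop s).drop 1 := by simp
                rw [hd, hz]; simp [List.replicate_succ]
              · omega)]
      rw [pv_take_set _ _ _ hs]
      simp [pvRow, hm]
    · rw [if_neg hm]
      rw [ih (s+1) _ i (by omega)
          (by have hd : row.drop (s+1) = (row.drop s).drop 1 := by simp
              rw [hd, hz]; simp [List.replicate_succ])]
      rw [pv_take_succ _ _ hs, hhead]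
      simp [pvRow, hm]

theorem pvB_eq (buttons : List (List Int)) (joltages : List Int) :
    full_buttons_alt buttons joltages = pvSpecMat buttons joltages.length := by
  unfold full_buttons_alt
  set n := joltages.length with hn
  set init := List.replicate n (List.replicate buttons.length (0 : Int)) with hinit
  apply List.ext_getElem
  · rw [pvB_len_outer0 n buttons init]
    simp [pvSpecMat, hinit]
  · intro i h1 h2
    have hin : i < n := by simpa [pvSpecMat] using h2
    have hfin := pvB_row_outer0 n i hin buttons init (by simp [hinit])
    have hrow : init.getD i [] = List.replicate buttons.length (0 : Int) := by
      rw [List.getD_eq_getElem _ _ (by simp [hinit]; omega)]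
      simp [hinit]
    rw [hrow] at hfin
    rw [pvMark_eq buttons 0 _ (i : Int) (by simp) (by simp)] at hfin
    simp only [List.take_zero, List.nil_append] at hfin
    have hspec : (pvSpecMat buttons n)[i]'h2 = pvRow buttons (i : Int) := by
      unfold pvSpecMat
      rw [List.getElem_map, List.getElem_range]
    rw [← List.getD_eq_getElem _ ([] : List Int) h1, hfin, hspec]

-- ===== VERDICT (by name: the statement is the Claim_ definition above) =====
theorem full_buttons_spec : Claim_equal_full_buttons := by
  intro buttons joltages _
  unfold Spec_full_buttons
  rw [pvA_eq, pvB_eq]
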